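-- pv_equiv track=rewrite | github.com/OZestina/TheGreatestGrace | codingTest/programmers/py/0310_MockTest.py | solution
-- ===== SOURCE A (Python) =====
-- def solution(answers):
--     answer = []
--     score = [0,0,0]
--
--     s1 = [1,2,3,4,5]
--     s2 = [2,1,2,3,2,4,2,5]
--     s3 = [3,3,1,1,2,2,4,4,5,5]
--
--     for i,v in enumerate(answers):
--         if v == s1[i%len(s1)]:
--             score[0] += 1
--         if v == s2[i%len(s2)]:
--             score[1] += 1
--         if v == s3[i%len(s3)]:
--             score[2] += 1
--
--     for i,v in enumerate(score):
--         if v == max(score):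
--             answer.append(i+1)
--
--     return answer
-- ===== SOURCE B (Python) =====
-- def solution(answers):
--     # Aggregate once: histogram of (index mod 40, value) pairs (40 = lcm of the
--     # three pattern lengths 5, 8, 10). Each pattern's score is then read off the
--     # 40-bucket histogram without rescanning answers.
--     freq = {}
--     for i, v in enumerate(answers):
--         key = (i % 40, v)
--         freq[key] = freq.get(key, 0) + 1
--     patterns = [[1, 2, 3, 4, 5],
--                 [2, 1, 2, 3, 2, 4, 2, 5],
--                 [3, 3, 1, 1, 2, 2, 4, 4, 5, 5]]
--     scores = [sum(freq.get((r, p[r % len(p)]), 0) for r in range(40))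
--               for p in patterns]
--     m = max(scores)
--     return [i + 1 for i, s in enumerate(scores) if s == m]
-- ===== Notes on version B (the rewrite author's own statement) =====
-- stated objective: alternative
-- what changed: B replaces A's per-element pattern checks with a two-phase algorithm: it first builds a histogram of (index mod 40, value) pairs (40 = lcm of the pattern lengths), then computes each pattern's score by summing 40 histogram buckets, so the patterns are never compared against the answers list directly.
import Mathlib
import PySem

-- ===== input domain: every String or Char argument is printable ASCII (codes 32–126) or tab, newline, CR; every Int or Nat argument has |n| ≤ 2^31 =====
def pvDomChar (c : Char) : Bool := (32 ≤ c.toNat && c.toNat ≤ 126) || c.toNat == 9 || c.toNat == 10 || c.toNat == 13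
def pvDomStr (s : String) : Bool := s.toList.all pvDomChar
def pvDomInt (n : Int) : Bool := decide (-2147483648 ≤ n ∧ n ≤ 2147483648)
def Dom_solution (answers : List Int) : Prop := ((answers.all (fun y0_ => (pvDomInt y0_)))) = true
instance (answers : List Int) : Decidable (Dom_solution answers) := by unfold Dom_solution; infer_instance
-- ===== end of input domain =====

-- B scores the patterns from a histogram of (index mod 40, value) pairs built in one pass
-- (40 = lcm of the pattern lengths), instead of A's per-element comparison against each pattern.

-- ===== PORT A =====
def solution (answers : List Int) : List Int :=
  let s1 : List Int := [1, 2, 3, 4, 5]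
  let s2 : List Int := [2, 1, 2, 3, 2, 4, 2, 5]
  let s3 : List Int := [3, 3, 1, 1, 2, 2, 4, 4, 5, 5]
  -- for i,v in enumerate(answers): three independent 'if' counter updates
  -- (index i % len(s) is always in range, so pyGetD's default is never used)
  let score : Int × Int × Int :=
    (PySem.List.enumerate answers 0).foldl
      (fun sc iv =>
        (if iv.2 == PySem.List.pyGetD s1 (PySem.Int.mod iv.1 (s1.length : Int)) 0 then sc.1 + 1 else sc.1,
         if iv.2 == PySem.List.pyGetD s2 (PySem.Int.mod iv.1 (s2.length : Int)) 0 then sc.2.1 + 1 else sc.2.1,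
         if iv.2 == PySem.List.pyGetD s3 (PySem.Int.mod iv.1 (s3.length : Int)) 0 then sc.2.2 + 1 else sc.2.2))
      (0, 0, 0)
  let scoreL : List Int := [score.1, score.2.1, score.2.2]
  -- for i,v in enumerate(score): append i+1 when v == max(score); score has 3 elements so max? is some
  (PySem.List.enumerate scoreL 0).foldl
    (fun acc iv =>
      if iv.2 == (PySem.List.max? scoreL (fun x => x)).getD 0 then acc ++ [iv.1 + 1] else acc)
    []

-- ===== PORT B =====
def solution_alt (answers : List Int) : List Int :=
  -- freq[(i % 40, v)] = freq.get((i % 40, v), 0) + 1, one pass over enumerate(answers)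
  let freq : PySem.Dict (Int × Int) Int :=
    (PySem.List.enumerate answers 0).foldl
      (fun d iv =>
        let key : Int × Int := (PySem.Int.mod iv.1 40, iv.2)
        d.insert key (d.getD key 0 + 1))
      PySem.Dict.empty
  let patterns : List (List Int) :=
    [[1, 2, 3, 4, 5], [2, 1, 2, 3, 2, 4, 2, 5], [3, 3, 1, 1, 2, 2, 4, 4, 5, 5]]
  -- score of p = sum over the 40 residue buckets of freq.get((r, p[r % len(p)]), 0)
  let scores : List Int := patterns.map (fun p =>
    (PySem.List.pyRange 0 40 1).foldl
      (fun acc r => acc + freq.getD (r, PySem.List.pyGetD p (PySem.Int.mod r (p.length : Int)) 0) 0)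
      0)
  let m : Int := (PySem.List.max? scores (fun x => x)).getD 0
  ((PySem.List.enumerate scores 0).filter (fun is => is.2 == m)).map (fun is => is.1 + 1)

-- ===== PRECONDITION & SPEC =====
def Spec_solution (answers : List Int) (out : List Int) : Prop := out = solution_alt answers
instance (answers : List Int) (out : List Int) : Decidable (Spec_solution answers out) := by unfold Spec_solution; infer_instance

-- ===== CLAIM (what is proved, stated in full; the proofs are below) =====
def Claim_equal_solution : Prop := ∀ (answers : List Int), Dom_solution answers → Spec_solution answers (solution answers)

-- ===== LEMMAS AND PROOFS =====

-- A's simultaneous triple-counter fold splits into three independent filter-lengths.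
theorem pv_foldl_triple (es : List (Int × Int)) (f g h : Int × Int → Bool)
    (a b c : Int) :
    es.foldl (fun sc iv =>
        (if f iv then sc.1 + 1 else sc.1,
         if g iv then sc.2.1 + 1 else sc.2.1,
         if h iv then sc.2.2 + 1 else sc.2.2)) (a, b, c)
      = (a + ((es.filter f).length : Int), b + ((es.filter g).length : Int),
         c + ((es.filter h).length : Int)) := by
  induction es generalizing a b c with
  | nil => simp
  | cons e t ih =>
      simp only [List.foldl_cons, List.filter_cons, ih]
      by_cases hf : f e <;> by_cases hg : g e <;> by_cases hh : h e <;>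
        simp [hf, hg, hh, Prod.ext_iff] <;> omega

-- B builds the histogram with d.insert key (d.getD key 0 + 1): it is the counter of the key list.
theorem pv_freq (answers : List Int) :
    (PySem.List.enumerate answers 0).foldl
        (fun d iv => d.insert ((PySem.Int.mod iv.1 40, iv.2) : Int × Int)
          (d.getD (PySem.Int.mod iv.1 40, iv.2) 0 + 1)) PySem.Dict.empty
      = PySem.Dict.counter
          ((PySem.List.enumerate answers 0).map (fun iv => (PySem.Int.mod iv.1 40, iv.2))) := by
  rw [← PySem.Dict.foldl_insert_getD_add_one_eq_counter, List.foldl_map]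

-- one bucket row: summing the indicator of key k over the 40 residues picks k up exactly
-- once, iff its value component matches the pattern at its residue.
theorem pv_row (k : Int × Int) (t : Int → Int) (h0 : 0 ≤ k.1) (h40 : k.1 < 40) :
    ((PySem.List.pyRange 0 40 1).map
        (fun r => if (r, t r) = k then (1 : Int) else 0)).sum
      = if k.2 == t k.1 then 1 else 0 := by
  by_cases hv : k.2 = t k.1
  · have hcong : ∀ r ∈ PySem.List.pyRange 0 40 1,
        (if (r, t r) = k then (1 : Int) else 0) = (if r == k.1 then 1 else 0) := by
      intro r _
      by_cases hr : r = k.1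
      · subst hr; simp [← hv]
      · simp [Prod.ext_iff, hr]
    rw [List.map_congr_left hcong,
        PySem.List.sum_map_ite_one_zero (fun r => r == k.1) (PySem.List.pyRange 0 40 1)]
    have hcnt : (PySem.List.pyRange 0 40 1).countP (fun r => r == k.1)
        = List.count k.1 (PySem.List.pyRange 0 40 1) := rfl
    rw [hcnt, List.count_eq_one_of_mem (by decide)
        (PySem.List.mem_pyRange_one.mpr ⟨h0, h40⟩)]
    simp [hv]
  · have hcong : ∀ r ∈ PySem.List.pyRange 0 40 1,
        (if (r, t r) = k then (1 : Int) else 0) = 0 := by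
      intro r _
      by_cases hr : r = k.1
      · subst hr
        rw [if_neg]
        intro h
        exact hv (congrArg Prod.snd h).symm
      · simp [Prod.ext_iff, hr]
    rw [List.map_congr_left hcong]
    have : (k.2 == t k.1) = false := by simp [hv]
    simp [this]

-- summing counter buckets over the 40 residues = number of keys whose value matches
theorem pv_sum_count (ks : List (Int × Int)) (t : Int → Int)
    (hk : ∀ k ∈ ks, 0 ≤ k.1 ∧ k.1 < 40) :
    ((PySem.List.pyRange 0 40 1).map (fun r => (ks.count (r, t r) : Int))).sum
      = ((ks.filter (fun k => k.2 == t k.1)).length : Int) := by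
  induction ks with
  | nil => simp
  | cons k ks ih =>
      have hb := hk k (List.mem_cons_self)
      have hrest : ∀ j ∈ ks, 0 ≤ j.1 ∧ j.1 < 40 := fun j hj => hk j (List.mem_cons_of_mem _ hj)
      have hcnt : ∀ r : Int, ((k :: ks).count (r, t r) : Int)
          = (ks.count (r, t r) : Int) + (if (r, t r) = k then 1 else 0) := by
        intro r
        rw [List.count_cons]
        by_cases h : (r, t r) = k
        · simp [h]
        · have h2 : (k == (r, t r)) = false := beq_eq_false_iff_ne.mpr (fun hh => h hh.symm)
          simp [h, h2]
      calc ((PySem.List.pyRange 0 40 1).map (fun r => ((k :: ks).count (r, t r) : Int))).sum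
          = ((PySem.List.pyRange 0 40 1).map (fun r =>
              (ks.count (r, t r) : Int) + (if (r, t r) = k then 1 else 0))).sum :=
            congrArg List.sum (List.map_congr_left (fun r _ => hcnt r))
        _ = ((PySem.List.pyRange 0 40 1).map (fun r => (ks.count (r, t r) : Int))).sum
            + ((PySem.List.pyRange 0 40 1).map (fun r => if (r, t r) = k then (1:Int) else 0)).sum :=
            PySem.List.sum_map_add_int _ _ _
        _ = ((ks.filter (fun j => j.2 == t j.1)).length : Int)
            + (if k.2 == t k.1 then 1 else 0) := by
            rw [ih hrest, pv_row k t hb.1 hb.2]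
        _ = (((k :: ks).filter (fun j => j.2 == t j.1)).length : Int) := by
            rw [List.filter_cons]
            by_cases h : k.2 == t k.1 <;> simp [h]

-- residues nest: a pattern length dividing 40 reads the same entry from i as from i % 40
theorem pv_mod_mod (i lp : Int) (hp : 0 < lp) (hd : lp ∣ 40) :
    PySem.Int.mod (PySem.Int.mod i 40) lp = PySem.Int.mod i lp := by
  rw [PySem.Int.mod_eq_emod_of_pos (by norm_num : (0:Int) < 40),
      PySem.Int.mod_eq_emod_of_pos hp, PySem.Int.mod_eq_emod_of_pos hp,
      Int.emod_emod_of_dvd _ hd]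

-- a pattern's bucket sum over the counter equals A's match count for that pattern
theorem pv_score_eq (p : List Int) (hp : 0 < p.length) (hd : ((p.length : Int)) ∣ 40)
    (answers : List Int) :
    (PySem.List.pyRange 0 40 1).foldl
        (fun acc r => acc + (PySem.Dict.counter
            ((PySem.List.enumerate answers 0).map (fun iv => (PySem.Int.mod iv.1 40, iv.2)))).getD
          (r, PySem.List.pyGetD p (PySem.Int.mod r (p.length : Int)) 0) 0) 0
      = (((PySem.List.enumerate answers 0).filter
            (fun iv => iv.2 == PySem.List.pyGetD p (PySem.Int.mod iv.1 (p.length : Int)) 0)).length : Int) := by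
  rw [PySem.List.foldl_add]
  simp only [PySem.Dict.getD_counter, zero_add]
  rw [pv_sum_count _ (fun r => PySem.List.pyGetD p (PySem.Int.mod r (p.length : Int)) 0)
      (by
        intro k hk
        rcases List.mem_map.mp hk with ⟨iv, _, rfl⟩
        exact ⟨PySem.Int.mod_nonneg _ (by norm_num), PySem.Int.mod_lt _ (by norm_num)⟩)]
  rw [List.filter_map, List.length_map]
  refine congrArg (fun l => ((List.length l : Nat) : Int)) (List.filter_congr ?_)
  intro iv _
  simp only [Function.comp]
  rw [pv_mod_mod iv.1 (p.length : Int) (by exact_mod_cast hp) hd]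

-- A's append-if fold over a 3-element enumerate equals B's filter/map comprehension.
theorem pv_pick3 (x y z m : Int) :
    (PySem.List.enumerate [x, y, z] 0).foldl
        (fun acc iv => if iv.2 == m then acc ++ [iv.1 + 1] else acc) []
      = ((PySem.List.enumerate [x, y, z] 0).filter (fun is => is.2 == m)).map
          (fun is => is.1 + 1) := by
  simp only [PySem.List.enumerate_cons, PySem.List.enumerate_nil,
    List.foldl_cons, List.foldl_nil, List.filter_cons, List.filter_nil]
  by_cases hx : x == m <;> by_cases hy : y == m <;> by_cases hz : z == m <;>
    simp [hx, hy, hz]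

-- ===== VERDICT (by name: the statement is the Claim_ definition above) =====
theorem solution_spec : Claim_equal_solution := by
  intro answers _
  unfold Spec_solution solution solution_alt
  simp only [List.map_cons, List.map_nil, pv_freq, pv_foldl_triple, zero_add]
  rw [pv_score_eq [1, 2, 3, 4, 5] (by decide) (by decide) answers,
      pv_score_eq [2, 1, 2, 3, 2, 4, 2, 5] (by decide) (by decide) answers,
      pv_score_eq [3, 3, 1, 1, 2, 2, 4, 4, 5, 5] (by decide) (by decide) answers]
  exact pv_pick3 _ _ _ _
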